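-- pv_equiv track=rewrite | github.com/wjantispam/dev | project/advant-of-code/2018/day2/day2_part1_count_uniqs_rev02.py | part1
-- ===== SOURCE A (Python) =====
-- from collections import Counter
-- from typing import List
--
-- def part1(input_s: List) -> int:
--     # input_s looks like ['abcdef\n', 'bababc\n', 'abbcde\n', 'abcccd\n', 'aabcdd\n', 'abcdee\n', 'ababab\n']
--     total_number_of_two_items = total_number_of_three_items = 0
--     for line in input_s:
--         line = line.strip('\n')
--
--         # Counter is subclass of Dict so it has the values methods
--         c = Counter(line).values()
--         if 2 in c:
--             total_number_of_two_items += 1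
--         if 3 in c:
--             total_number_of_three_items += 1
--
--     return total_number_of_two_items*total_number_of_three_items
-- ===== SOURCE B (Python) =====
-- from typing import List
--
-- def _run_lengths(chars):
--     # chars is sorted; return the lengths of its maximal runs of equal chars
--     if not chars:
--         return []
--     c = chars[0]
--     i = 1
--     while i < len(chars) and chars[i] == c:
--         i += 1
--     return [i] + _run_lengths(chars[i:])
--
-- def part1(input_s: List) -> int:
--     twos = threes = 0
--     for line in input_s:
--         lengths = _run_lengths(sorted(line.strip('\n')))
--         if 2 in lengths:
--             twos += 1
--         if 3 in lengths:
--             threes += 1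
--     return twos * threes
-- ===== Notes on version B (the rewrite author's own statement) =====
-- stated objective: alternative
-- what changed: Per line, instead of building a Counter hash histogram and testing its values, B sorts the line's characters and scans the maximal runs of equal characters, testing the run lengths for 2 and 3.
import Mathlib
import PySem

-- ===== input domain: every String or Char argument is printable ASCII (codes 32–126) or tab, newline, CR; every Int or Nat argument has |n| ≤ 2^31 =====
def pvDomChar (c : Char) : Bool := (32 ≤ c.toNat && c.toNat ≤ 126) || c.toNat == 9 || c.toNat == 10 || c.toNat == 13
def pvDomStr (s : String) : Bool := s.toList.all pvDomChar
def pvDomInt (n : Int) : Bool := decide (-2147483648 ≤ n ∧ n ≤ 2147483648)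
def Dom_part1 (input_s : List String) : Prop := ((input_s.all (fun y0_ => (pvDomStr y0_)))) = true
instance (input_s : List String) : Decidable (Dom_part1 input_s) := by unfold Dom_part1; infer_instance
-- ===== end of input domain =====

-- B replaces A's per-line Counter histogram by sorting the line's characters and scanning
-- the maximal runs of equal characters (alternative decomposition, similar cost).

-- ===== PORT A =====
def part1 (input_s : List String) : Int :=
  let p := input_s.foldl (fun (p : Int × Int) line =>
    let stripped := PySem.Str.stripChars line "\n"
    let c := (PySem.Dict.counter stripped.toList).values
    let t2 := if (2 : Int) ∈ c then p.1 + 1 else p.1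
    let t3 := if (3 : Int) ∈ c then p.2 + 1 else p.2
    (t2, t3)) (0, 0)
  p.1 * p.2

-- ===== PORT B =====
-- run lengths of a list of chars: inner while loop = takeWhile, recursion on the rest
def runLengths : List Char → List Nat
  | [] => []
  | c :: cs =>
      ((cs.takeWhile (· == c)).length + 1) :: runLengths (cs.dropWhile (· == c))
  termination_by l => l.length
  decreasing_by
    simpa using Nat.lt_succ_of_le (List.length_dropWhile_le _ _)

def part1_alt (input_s : List String) : Int :=
  let p := input_s.foldl (fun (p : Int × Int) line =>
    let lengths := runLengths
      (PySem.List.sorted (PySem.Str.stripChars line "\n").toList (fun x => x) false)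
    let t2 := if (2 : Nat) ∈ lengths then p.1 + 1 else p.1
    let t3 := if (3 : Nat) ∈ lengths then p.2 + 1 else p.2
    (t2, t3)) (0, 0)
  p.1 * p.2

-- ===== PRECONDITION & SPEC =====
def Spec_part1 (input_s : List String) (out : Int) : Prop := out = part1_alt input_s
instance (input_s : List String) (out : Int) : Decidable (Spec_part1 input_s out) := by unfold Spec_part1; infer_instance

-- ===== CLAIM (what is proved, stated in full; the proofs are below) =====
def Claim_equal_part1 : Prop := ∀ (input_s : List String), Dom_part1 input_s → Spec_part1 input_s (part1 input_s)

-- ===== LEMMAS AND PROOFS =====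

-- elements after the dropped prefix are strictly greater than c, in a sorted list
lemma lt_of_mem_dropWhile (c : Char) (cs : List Char)
    (hle : ∀ x ∈ cs, c ≤ x) (hp : cs.Pairwise (· ≤ ·)) :
    ∀ x ∈ cs.dropWhile (· == c), c < x := by
  induction cs with
  | nil => simp
  | cons a cs ih =>
    rcases List.pairwise_cons.mp hp with ⟨ha, hp'⟩
    by_cases hac : a = c
    · subst hac
      simp only [List.dropWhile_cons, beq_self_eq_true]
      exact ih (fun x hx => hle x (List.mem_cons_of_mem _ hx)) hp'
    · have hca : c < a := lt_of_le_of_ne (hle a (List.mem_cons_self)) (Ne.symm hac)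
      have : (a :: cs).dropWhile (· == c) = a :: cs := by
        simp [hac]
      rw [this]
      intro x hx
      rcases List.mem_cons.mp hx with rfl | hx
      · exact hca
      · exact lt_of_lt_of_le hca (ha x hx)

-- run lengths of a sorted list are exactly the multiplicities of its elements
lemma mem_runLengths_iff (ys : List Char) (h : ys.Pairwise (· ≤ ·)) (n : Nat) :
    n ∈ runLengths ys ↔ ∃ c ∈ ys, ys.count c = n := by
  induction ys using runLengths.induct with
  | case1 => simp [runLengths]
  | case2 c cs ih =>
    rcases List.pairwise_cons.mp h with ⟨hle, hcs⟩
    set t := cs.takeWhile (· == c) with ht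
    set dr := cs.dropWhile (· == c) with hdr
    have hsplit : cs = t ++ dr := (List.takeWhile_append_dropWhile).symm
    have htc : ∀ x ∈ t, x = c := by
      intro x hx
      exact eq_of_beq (List.mem_takeWhile_imp (p := (· == c)) (ht ▸ hx))
    have hdrlt : ∀ x ∈ dr, c < x := lt_of_mem_dropWhile c cs hle hcs
    have hdrsub : dr.Sublist cs := List.dropWhile_sublist _
    have hdrp : dr.Pairwise (· ≤ ·) := hcs.sublist hdrsub
    have hcount_c : (c :: cs).count c = t.length + 1 := by
      rw [hsplit, List.count_cons_self, List.count_append]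
      have h1 : t.count c = t.length := List.count_eq_length.mpr (fun b hb => (htc b hb).symm)
      have h2 : dr.count c = 0 := List.count_eq_zero.mpr (fun hc => absurd (hdrlt c hc) (lt_irrefl c))
      omega
    have hcount_dr : ∀ x ∈ dr, (c :: cs).count x = dr.count x := by
      intro x hx
      have hxc : x ≠ c := fun he => absurd (hdrlt x hx) (by simp [he])
      rw [hsplit, List.count_cons_of_ne hxc.symm, List.count_append]
      have : t.count x = 0 := List.count_eq_zero.mpr (fun hc => hxc (htc x hc))
      omega
    rw [runLengths]
    simp only [List.mem_cons]
    constructor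
    · rintro (rfl | hmem)
      · exact ⟨c, Or.inl rfl, hcount_c⟩
      · rcases (ih hdrp).mp hmem with ⟨x, hx, hcnt⟩
        exact ⟨x, Or.inr (by rw [hsplit]; exact List.mem_append_right _ hx),
               by rw [hcount_dr x hx]; exact hcnt⟩
    · rintro ⟨x, hx, hcnt⟩
      rcases hx with rfl | hx
      · left; rw [← ht]; omega
      · rw [hsplit] at hx
        rcases List.mem_append.mp hx with hx | hx
        · have hxeq := htc x hx; subst hxeq
          left; rw [← ht]; omega
        · right
          exact (ih hdrp).mpr ⟨x, hx, by rw [← hcount_dr x hx]; exact hcnt⟩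

-- A's membership test in the Counter's values, characterised by multiplicities
lemma mem_counter_values_iff (l : List Char) (n : Int) :
    n ∈ (PySem.Dict.counter l).values ↔ ∃ c ∈ l, (l.count c : Int) = n := by
  have : (PySem.Dict.counter l).values
      = ((PySem.Set.ofList l).map (fun k => (k, (l.count k : Int)))).map (·.2) := by
    simp only [PySem.Dict.values, PySem.Dict.items_counter]
  rw [this, List.map_map]
  simp [PySem.Set.mem_ofList]

-- the two per-line tests agree
lemma line_test_eq (l : List Char) (n : Nat) :
    ((n : Int) ∈ (PySem.Dict.counter l).values)
      ↔ (n ∈ runLengths (PySem.List.sorted l (fun x => x) false)) := by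
  have hperm : (PySem.List.sorted l (fun x => x) false).Perm l := PySem.List.sorted_perm l _ _
  have hpair : (PySem.List.sorted l (fun x => x) false).Pairwise (· ≤ ·) := by
    simpa using PySem.List.sorted_pairwise l (fun x => x)
  rw [mem_counter_values_iff, mem_runLengths_iff _ hpair]
  constructor
  · rintro ⟨c, hc, hcnt⟩
    exact ⟨c, hperm.mem_iff.mpr hc, by rw [hperm.count_eq]; omega⟩
  · rintro ⟨c, hc, hcnt⟩
    refine ⟨c, hperm.mem_iff.mp hc, ?_⟩
    rw [← hperm.count_eq, hcnt]

-- ===== VERDICT (by name: the statement is the Claim_ definition above) =====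
-- the two per-line fold steps compute the same pair, hence the folds agree
lemma fold_eq (l : List String) (p : Int × Int) :
    l.foldl (fun (p : Int × Int) line =>
        (if (2 : Int) ∈ (PySem.Dict.counter (PySem.Str.stripChars line "\n").toList).values
           then p.1 + 1 else p.1,
         if (3 : Int) ∈ (PySem.Dict.counter (PySem.Str.stripChars line "\n").toList).values
           then p.2 + 1 else p.2)) p
      = l.foldl (fun (p : Int × Int) line =>
        (if (2 : Nat) ∈ runLengths
              (PySem.List.sorted (PySem.Str.stripChars line "\n").toList (fun x => x) false)
           then p.1 + 1 else p.1,
         if (3 : Nat) ∈ runLengths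
              (PySem.List.sorted (PySem.Str.stripChars line "\n").toList (fun x => x) false)
           then p.2 + 1 else p.2)) p := by
  apply List.foldl_ext
  intro q line _
  have h2 := line_test_eq (PySem.Str.stripChars line "\n").toList 2
  have h3 := line_test_eq (PySem.Str.stripChars line "\n").toList 3
  simp only [Nat.cast_ofNat] at h2 h3
  simp only [h2, h3]

-- ===== VERDICT (by name: the statement is the Claim_ definition above) =====
theorem part1_spec : Claim_equal_part1 := by
  intro input_s _
  show part1 input_s = part1_alt input_s
  simp only [part1, part1_alt]
  rw [fold_eq]
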